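-- pv_equiv track=rewrite | github.com/pensarnada/Python-Homeworks | Python-Homeworks/YH_hw4.py | Check_DNA_RNA
-- ===== SOURCE A (Python) =====
-- count=0 # Counts invalid letters for function_1
--
-- def Check_Valid(sequence,count): # Checks if Nucleic acid is valid or invalid
--     Nucs=["A","C","G","T","U"]
--     if len(sequence) == 0 :
--         if count>0:
--             return "invalid"
--         else:
--             return "valid"
--     else:
--         if "U" in sequence and "T" in sequence:
--             count+=1
--         elif sequence[0] not in Nucs:
--             count+=1
--         return Check_Valid(sequence[1:],count)
--
-- def Check_DNA_RNA(sequence): # Checks if given Nucleic acid is DNA or RNA or invalid.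
--     if Check_Valid(sequence,count)=="valid":
--
--         if len(sequence) == 0:
--             return "uncertain"
--
--         if sequence[0]=="T":
--             return "DNA"
--         elif sequence[0]=="U":
--             return "RNA"
--         else:
--             return Check_DNA_RNA(sequence[1:])
--     else:
--         return "invalid"
-- ===== SOURCE B (Python) =====
-- def Check_DNA_RNA(sequence):
--     # Single linear scan instead of A's nested recursion over suffixes.
--     has_t = has_u = False
--     first = ""
--     for ch in sequence:
--         if ch not in ("A", "C", "G", "T", "U"):
--             return "invalid"
--         if ch == "T":
--             has_t = True
--             if not first:
--                 first = "DNA"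
--         elif ch == "U":
--             has_u = True
--             if not first:
--                 first = "RNA"
--         if has_t and has_u:
--             return "invalid"
--     return first if first else "uncertain"
-- ===== Notes on version B (the rewrite author's own statement) =====
-- stated objective: faster
-- what changed: Replaced A's recursion that re-validates every suffix (each validation itself scanning all its suffixes with substring tests) by one linear scan tracking whether T and U were seen and the first T/U classification.
import Mathlib
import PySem

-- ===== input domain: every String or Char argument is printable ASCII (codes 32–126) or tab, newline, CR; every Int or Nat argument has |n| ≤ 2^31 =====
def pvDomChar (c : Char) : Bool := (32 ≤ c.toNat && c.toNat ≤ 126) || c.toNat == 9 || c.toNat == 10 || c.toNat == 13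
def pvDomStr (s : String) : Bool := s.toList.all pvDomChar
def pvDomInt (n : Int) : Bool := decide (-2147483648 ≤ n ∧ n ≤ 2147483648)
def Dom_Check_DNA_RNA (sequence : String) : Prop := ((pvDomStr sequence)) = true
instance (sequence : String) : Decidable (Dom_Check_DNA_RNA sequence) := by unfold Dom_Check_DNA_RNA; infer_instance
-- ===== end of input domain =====

-- B replaces A's recursion that re-validates every suffix by one linear scan (asymptotically faster).

-- ===== PORT A =====
-- Check_Valid(sequence, count): recursion over the string, incrementing count per A's rules.
def checkValidA : List Char → Int → String
  | [], count => if count > 0 then "invalid" else "valid"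
  | c :: rest, count =>
    let count :=
      if 'U' ∈ (c :: rest) ∧ 'T' ∈ (c :: rest) then count + 1
      else if c ∉ (['A', 'C', 'G', 'T', 'U'] : List Char) then count + 1
      else count
    checkValidA rest count

def checkDnaRnaA : List Char → String
  | [] => if checkValidA [] 0 = "valid" then "uncertain" else "invalid"
  | c :: rest =>
    if checkValidA (c :: rest) 0 = "valid" then
      if c = 'T' then "DNA"
      else if c = 'U' then "RNA"
      else checkDnaRnaA rest
    else "invalid"

def Check_DNA_RNA (sequence : String) : String := checkDnaRnaA sequence.toList

-- ===== PORT B =====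
-- single linear scan: (hasT, hasU, first) state as in Source B's loop
def altLoopB : List Char → Bool → Bool → String → String
  | [], _, _, first => if first = "" then "uncertain" else first
  | c :: rest, hasT, hasU, first =>
    if c ∉ (['A', 'C', 'G', 'T', 'U'] : List Char) then "invalid"
    else
      let s : Bool × Bool × String :=
        if c = 'T' then (true, hasU, if first = "" then "DNA" else first)
        else if c = 'U' then (hasT, true, if first = "" then "RNA" else first)
        else (hasT, hasU, first)
      if s.1 && s.2.1 then "invalid"
      else altLoopB rest s.1 s.2.1 s.2.2

def Check_DNA_RNA_alt (sequence : String) : String :=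
  altLoopB sequence.toList false false ""

-- ===== PRECONDITION & SPEC =====
def Spec_Check_DNA_RNA (sequence : String) (out : String) : Prop := out = Check_DNA_RNA_alt sequence
instance (sequence : String) (out : String) : Decidable (Spec_Check_DNA_RNA sequence out) := by unfold Spec_Check_DNA_RNA; infer_instance

-- ===== CLAIM (what is proved, stated in full; the proofs are below) =====
def Claim_equal_Check_DNA_RNA : Prop := ∀ (sequence : String), Dom_Check_DNA_RNA sequence → Spec_Check_DNA_RNA sequence (Check_DNA_RNA sequence)

-- ===== LEMMAS AND PROOFS =====

def pvNucs : List Char := ['A', 'C', 'G', 'T', 'U']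

def pvGood (l : List Char) : Prop := (∀ c ∈ l, c ∈ pvNucs) ∧ ¬('T' ∈ l ∧ 'U' ∈ l)

def pvFirstTU : List Char → String
  | [] => "uncertain"
  | c :: rest => if c = 'T' then "DNA" else if c = 'U' then "RNA" else pvFirstTU rest

-- number of increments checkValidA performs while consuming l
def pvIncs : List Char → Nat
  | [] => 0
  | c :: rest =>
    (if 'U' ∈ (c :: rest) ∧ 'T' ∈ (c :: rest) then 1
     else if c ∉ pvNucs then 1 else 0) + pvIncs rest

lemma checkValidA_valid_iff (l : List Char) : ∀ count : Int,
    (checkValidA l count = "valid" ↔ count + (pvIncs l : Int) ≤ 0) := by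
  induction l with
  | nil =>
    intro count
    simp only [checkValidA, pvIncs, Nat.cast_zero, add_zero]
    split_ifs with h
    · constructor
      · intro hv; exact absurd hv (by decide)
      · omega
    · simp only [true_iff]; omega
  | cons c rest ih =>
    intro count
    simp only [checkValidA, pvIncs, pvNucs]
    split_ifs with h1 h2 <;>
      rw [ih] <;> push_cast <;> constructor <;> intro <;> omega

lemma pvIncs_zero_iff (l : List Char) : pvIncs l = 0 ↔ pvGood l := by
  induction l with
  | nil => simp [pvIncs, pvGood]
  | cons c rest ih =>
    simp only [pvIncs, Nat.add_eq_zero_iff, ih, pvGood]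
    constructor
    · rintro ⟨h1, h2, h3⟩
      by_cases hb : 'U' ∈ (c :: rest) ∧ 'T' ∈ (c :: rest)
      · rw [if_pos hb] at h1; exact absurd h1 one_ne_zero
      · rw [if_neg hb] at h1
        by_cases hc : c ∉ pvNucs
        · rw [if_pos hc] at h1; exact absurd h1 one_ne_zero
        · push_neg at hc
          refine ⟨fun x hx => ?_, fun ⟨hT, hU⟩ => hb ⟨hU, hT⟩⟩
          rcases List.mem_cons.mp hx with rfl | hx
          · exact hc
          · exact h2 x hx
    · rintro ⟨hall, hnb⟩
      have hc : c ∈ pvNucs := hall c (List.mem_cons_self ..)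
      have hb : ¬('U' ∈ (c :: rest) ∧ 'T' ∈ (c :: rest)) := fun ⟨hU, hT⟩ => hnb ⟨hT, hU⟩
      refine ⟨by rw [if_neg hb, if_neg (by simp [hc])],
        fun x hx => hall x (List.mem_cons_of_mem _ hx),
        fun ⟨hT, hU⟩ => hnb ⟨List.mem_cons_of_mem _ hT, List.mem_cons_of_mem _ hU⟩⟩

lemma checkValidA_zero (l : List Char) : checkValidA l 0 = "valid" ↔ pvGood l := by
  rw [checkValidA_valid_iff, ← pvIncs_zero_iff]
  omega

lemma pvGood_tail {c : Char} {rest : List Char} (h : pvGood (c :: rest)) : pvGood rest :=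
  ⟨fun x hx => h.1 x (List.mem_cons_of_mem _ hx),
    fun ⟨hT, hU⟩ => h.2 ⟨List.mem_cons_of_mem _ hT, List.mem_cons_of_mem _ hU⟩⟩

lemma checkDnaRnaA_good : ∀ l : List Char, pvGood l → checkDnaRnaA l = pvFirstTU l := by
  intro l
  induction l with
  | nil =>
    intro h
    simp [checkDnaRnaA, checkValidA_zero, h, pvFirstTU]
  | cons c rest ih =>
    intro hg
    simp only [checkDnaRnaA, pvFirstTU]
    rw [if_pos ((checkValidA_zero _).mpr hg)]
    split_ifs with hT hU
    · rfl
    · rfl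
    · exact ih (pvGood_tail hg)

lemma checkDnaRnaA_bad : ∀ l : List Char, ¬ pvGood l → checkDnaRnaA l = "invalid" := by
  intro l h
  cases l with
  | nil => exact absurd ⟨fun x hx => absurd hx List.not_mem_nil, by simp⟩ h
  | cons c rest =>
    simp only [checkDnaRnaA]
    rw [if_neg (fun hv => h ((checkValidA_zero _).mp hv))]

-- B-side: the scan returns "invalid" once a bad char is in l or both T and U are seen/coming
lemma altLoopB_invalid : ∀ (l : List Char) (hasT hasU : Bool) (first : String),
    (hasT && hasU) = false →
    ((∃ c ∈ l, c ∉ pvNucs) ∨ ((hasT = true ∨ 'T' ∈ l) ∧ (hasU = true ∨ 'U' ∈ l))) →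
    altLoopB l hasT hasU first = "invalid" := by
  intro l
  induction l with
  | nil =>
    intro hasT hasU first hb h
    rcases h with ⟨c, hc, _⟩ | ⟨hT | hT, hU | hU⟩ <;> simp_all
  | cons c rest ih =>
    intro hasT hasU first hb h
    by_cases hcn : c ∈ pvNucs
    · by_cases hT : c = 'T'
      · subst hT
        cases hasU with
        | true => simp [altLoopB]
        | false =>
          simp only [altLoopB]
          simp
          refine ih true false _ rfl ?_
          rcases h with ⟨x, hx, hxn⟩ | ⟨_, hU2 | hU2⟩
          · rcases List.mem_cons.mp hx with rfl | hx
            · exact absurd hcn hxn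
            · exact Or.inl ⟨x, hx, hxn⟩
          · exact absurd hU2 (by decide)
          · right
            refine ⟨Or.inl rfl, Or.inr ?_⟩
            rcases List.mem_cons.mp hU2 with h' | h'
            · exact absurd h' (by decide)
            · exact h'
      · by_cases hU : c = 'U'
        · subst hU
          cases hasT with
          | true => simp [altLoopB]
          | false =>
            simp only [altLoopB]
            simp
            refine ih false true _ rfl ?_
            rcases h with ⟨x, hx, hxn⟩ | ⟨hT2 | hT2, _⟩
            · rcases List.mem_cons.mp hx with rfl | hx
              · exact absurd hcn hxn
              · exact Or.inl ⟨x, hx, hxn⟩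
            · exact absurd hT2 (by decide)
            · right
              refine ⟨Or.inr ?_, Or.inl rfl⟩
              rcases List.mem_cons.mp hT2 with h' | h'
              · exact absurd h' (by decide)
              · exact h'
        · -- c ∈ {A,C,G}: state unchanged
          have hcn' : c ∈ (['A', 'C', 'G', 'T', 'U'] : List Char) := hcn
          simp only [altLoopB]
          simp only [if_neg (not_not_intro hcn'), if_neg hT, if_neg hU, hb,
            Bool.false_eq_true, if_false]
          refine ih hasT hasU first hb ?_
          rcases h with ⟨x, hx, hxn⟩ | ⟨hT2, hU2⟩
          · rcases List.mem_cons.mp hx with rfl | hx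
            · exact absurd hcn hxn
            · exact Or.inl ⟨x, hx, hxn⟩
          · right
            constructor
            · rcases hT2 with h' | h'
              · exact Or.inl h'
              · rcases List.mem_cons.mp h' with rfl | h''
                · exact absurd rfl hT
                · exact Or.inr h''
            · rcases hU2 with h' | h'
              · exact Or.inl h'
              · rcases List.mem_cons.mp h' with rfl | h''
                · exact absurd rfl hU
                · exact Or.inr h''
    · -- bad char at the head: immediate "invalid"
      have hcn' : c ∉ (['A', 'C', 'G', 'T', 'U'] : List Char) := hcn
      simp only [altLoopB]
      rw [if_pos hcn']

-- once first is set and nothing invalid remains, the scan returns first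
lemma altLoopB_skip : ∀ (l : List Char) (hasT hasU : Bool) (first : String),
    first ≠ "" → (∀ c ∈ l, c ∈ pvNucs) →
    ¬((hasT = true ∨ 'T' ∈ l) ∧ (hasU = true ∨ 'U' ∈ l)) →
    altLoopB l hasT hasU first = first := by
  intro l
  induction l with
  | nil =>
    intro hasT hasU first hf _ _
    simp [altLoopB, hf]
  | cons c rest ih =>
    intro hasT hasU first hf hall hnb
    have hcn : c ∈ pvNucs := hall c (List.mem_cons_self ..)
    have hall' : ∀ x ∈ rest, x ∈ pvNucs := fun x hx => hall x (List.mem_cons_of_mem _ hx)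
    by_cases hT : c = 'T'
    · subst hT
      have hU1 : hasU = false := by
        by_contra h'
        exact hnb ⟨Or.inr (List.mem_cons_self ..), Or.inl (by simpa using h')⟩
      have hU2 : 'U' ∉ rest := fun h' =>
        hnb ⟨Or.inr (List.mem_cons_self ..), Or.inr (List.mem_cons_of_mem _ h')⟩
      subst hU1
      simp only [altLoopB]
      simp [hf]
      exact ih true false first hf hall' (by simp [hU2])
    · by_cases hUc : c = 'U'
      · subst hUc
        have hT1 : hasT = false := by
          by_contra h'
          exact hnb ⟨Or.inl (by simpa using h'), Or.inr (List.mem_cons_self ..)⟩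
        have hT2 : 'T' ∉ rest := fun h' =>
          hnb ⟨Or.inr (List.mem_cons_of_mem _ h'), Or.inr (List.mem_cons_self ..)⟩
        subst hT1
        simp only [altLoopB]
        simp [hf]
        exact ih false true first hf hall' (by simp [hT2])
      · have hcn' : c ∈ (['A', 'C', 'G', 'T', 'U'] : List Char) := hcn
        simp only [altLoopB]
        have hb : ¬((hasT && hasU) = true) := by
          intro h'
          simp only [Bool.and_eq_true] at h'
          exact hnb ⟨Or.inl h'.1, Or.inl h'.2⟩
        simp only [if_neg (not_not_intro hcn'), if_neg hT, if_neg hUc, if_neg hb]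
        refine ih hasT hasU first hf hall' ?_
        intro ⟨h1, h2⟩
        apply hnb
        constructor
        · rcases h1 with h' | h'
          · exact Or.inl h'
          · exact Or.inr (List.mem_cons_of_mem _ h')
        · rcases h2 with h' | h'
          · exact Or.inl h'
          · exact Or.inr (List.mem_cons_of_mem _ h')

lemma altLoopB_good : ∀ l : List Char, pvGood l → altLoopB l false false "" = pvFirstTU l := by
  intro l
  induction l with
  | nil => intro _; rfl
  | cons c rest ih =>
    intro hg
    have hcn : c ∈ pvNucs := hg.1 c (List.mem_cons_self ..)
    have hall' : ∀ x ∈ rest, x ∈ pvNucs := fun x hx => hg.1 x (List.mem_cons_of_mem _ hx)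
    by_cases hT : c = 'T'
    · subst hT
      have hU : 'U' ∉ rest :=
        fun h' => hg.2 ⟨List.mem_cons_self .., List.mem_cons_of_mem _ h'⟩
      simp only [altLoopB, pvFirstTU]
      simp
      exact altLoopB_skip rest true false "DNA" (by decide) hall' (by simp [hU])
    · by_cases hUc : c = 'U'
      · subst hUc
        have hT2 : 'T' ∉ rest :=
          fun h' => hg.2 ⟨List.mem_cons_of_mem _ h', List.mem_cons_self ..⟩
        simp only [altLoopB, pvFirstTU]
        simp
        exact altLoopB_skip rest false true "RNA" (by decide) hall' (by simp [hT2])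
      · have hcn' : c ∈ (['A', 'C', 'G', 'T', 'U'] : List Char) := hcn
        simp only [altLoopB, pvFirstTU]
        simp only [if_neg (not_not_intro hcn'), if_neg hT, if_neg hUc]
        simpa using ih (pvGood_tail hg)

lemma altLoopB_bad (l : List Char) (hg : ¬ pvGood l) :
    altLoopB l false false "" = "invalid" := by
  apply altLoopB_invalid l false false "" rfl
  unfold pvGood at hg
  rcases not_and_or.mp hg with h | h
  · push_neg at h
    obtain ⟨x, hx, hxn⟩ := h
    exact Or.inl ⟨x, hx, hxn⟩
  · push_neg at h
    exact Or.inr ⟨Or.inr h.1, Or.inr h.2⟩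

-- ===== VERDICT (by name: the statement is the Claim_ definition above) =====
theorem Check_DNA_RNA_spec : Claim_equal_Check_DNA_RNA := by
  intro sequence _
  unfold Spec_Check_DNA_RNA Check_DNA_RNA Check_DNA_RNA_alt
  by_cases hg : pvGood sequence.toList
  · rw [checkDnaRnaA_good _ hg, altLoopB_good _ hg]
  · rw [checkDnaRnaA_bad _ hg, altLoopB_bad _ hg]
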